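-- pv_equiv track=rewrite | github.com/VIKRAM2563/Hotspot-Attendance-System | helper_functions.py | count_empty_benches
-- ===== SOURCE A (Python) =====
-- def count_empty_benches(benches, total_rows, total_columns):
--     """Counts the number of empty benches in a dictionary that maps benches to the number of students present at each bench.
--
--     Args:
--         benches: A dictionary that maps benches to the number of students present at each bench.
--         total_rows: The total number of rows in the bench matrix.
--         total_columns: The total number of columns in the bench matrix.
--
--     Returns:
--         The number of empty benches.
--     """
--
--     empty_benches = 0
--
--     for i in range(total_rows):
--         for j in range(total_columns):
--             bench = (i + 1, j + 1)
--             if bench in benches: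
--                 count = benches[bench]['count']
--                 if count == 1 or count == 2:
--                     continue
--             else:
--                 empty_benches += 1
--
--     return empty_benches
-- ===== SOURCE B (Python) =====
-- def count_empty_benches(benches, total_rows, total_columns):
--     occupied = {b for b in benches
--                 if len(b) == 2
--                 and 1 <= b[0] <= total_rows
--                 and 1 <= b[1] <= total_columns}
--     return max(total_rows, 0) * max(total_columns, 0) - len(occupied)
-- ===== Notes on version B (the rewrite author's own statement) =====
-- stated objective: faster
-- what changed: Instead of scanning every grid cell and testing dict membership, B iterates once over the benches keys, counts the distinct keys lying inside the grid, and subtracts that from max(rows,0)*max(cols,0).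
import Mathlib
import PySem

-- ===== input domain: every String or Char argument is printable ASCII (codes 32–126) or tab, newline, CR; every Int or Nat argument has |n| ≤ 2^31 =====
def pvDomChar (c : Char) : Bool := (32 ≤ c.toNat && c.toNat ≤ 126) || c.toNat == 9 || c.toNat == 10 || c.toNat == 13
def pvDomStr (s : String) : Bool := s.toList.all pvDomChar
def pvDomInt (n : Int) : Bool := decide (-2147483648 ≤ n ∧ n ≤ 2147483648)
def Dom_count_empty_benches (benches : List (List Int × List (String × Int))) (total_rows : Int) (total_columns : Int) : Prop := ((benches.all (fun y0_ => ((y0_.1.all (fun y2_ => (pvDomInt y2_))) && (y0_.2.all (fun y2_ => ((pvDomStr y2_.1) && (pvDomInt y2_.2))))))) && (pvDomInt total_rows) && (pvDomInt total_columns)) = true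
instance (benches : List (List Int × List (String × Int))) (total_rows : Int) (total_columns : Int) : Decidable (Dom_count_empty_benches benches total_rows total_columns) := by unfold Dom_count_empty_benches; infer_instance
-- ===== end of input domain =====

-- B replaces A's scan of every grid cell by one pass over the benches keys:
-- count the distinct in-grid keys and subtract from max(rows,0)*max(cols,0) (objective: faster).

-- ===== PORT A =====
def count_empty_benches (benches : List (List Int × List (String × Int))) (total_rows : Int) (total_columns : Int) : Int :=
  (PySem.List.pyRange 0 total_rows 1).foldl (fun empty_benches i =>
    (PySem.List.pyRange 0 total_columns 1).foldl (fun empty_benches j =>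
      -- bench = (i + 1, j + 1), inlined
      if (benches.map Prod.fst).contains ([i + 1, j + 1] : List Int) then
        match List.lookup ([i + 1, j + 1] : List Int) benches with
        | some v =>
          match List.lookup "count" v with
          | some count => if count = 1 ∨ count = 2 then empty_benches else empty_benches
          | none => empty_benches   -- Python raises KeyError here; excluded by Pre_
        | none => empty_benches     -- unreachable: the key is contained
      else empty_benches + 1) empty_benches) 0

-- ===== PORT B =====
-- key lies inside the grid: it is a pair (r, c) with 1 ≤ r ≤ total_rows and 1 ≤ c ≤ total_columns
def pvInGrid (total_rows : Int) (total_columns : Int) (b : List Int) : Bool :=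
  match b with
  | [r, c] => decide (1 ≤ r) && decide (r ≤ total_rows) && decide (1 ≤ c) && decide (c ≤ total_columns)
  | _ => false

def count_empty_benches_alt (benches : List (List Int × List (String × Int))) (total_rows : Int) (total_columns : Int) : Int :=
  let occupied := PySem.Set.ofList ((benches.map Prod.fst).filter (pvInGrid total_rows total_columns))
  max total_rows 0 * max total_columns 0 - (occupied.length : Int)

-- ===== PRECONDITION & SPEC =====
-- Pre_ excludes exactly the inputs on which Python A raises KeyError: an in-grid bench key
-- whose (first-match) value dict has no "count" entry.
def Pre_count_empty_benches (benches : List (List Int × List (String × Int))) (total_rows : Int) (total_columns : Int) : Prop :=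
  ∀ p ∈ benches, pvInGrid total_rows total_columns p.1 = true →
    List.lookup p.1 benches = some p.2 → "count" ∈ p.2.map Prod.fst
instance (benches : List (List Int × List (String × Int))) (total_rows : Int) (total_columns : Int) : Decidable (Pre_count_empty_benches benches total_rows total_columns) := by unfold Pre_count_empty_benches; infer_instance

def pvWitness_count_empty_benches : (List (List Int × List (String × Int))) × Int × Int :=
  ([([1, 1], [("count", 1)]), ([2, 2], [("count", 0)])], 2, 2)

def Spec_count_empty_benches (benches : List (List Int × List (String × Int))) (total_rows : Int) (total_columns : Int) (out : Int) : Prop := out = count_empty_benches_alt benches total_rows total_columns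
instance (benches : List (List Int × List (String × Int))) (total_rows : Int) (total_columns : Int) (out : Int) : Decidable (Spec_count_empty_benches benches total_rows total_columns out) := by unfold Spec_count_empty_benches; infer_instance

-- ===== CLAIM (what is proved, stated in full; the proofs are below) =====
def Claim_equal_count_empty_benches : Prop := ∀ (benches : List (List Int × List (String × Int))) (total_rows : Int) (total_columns : Int), Dom_count_empty_benches benches total_rows total_columns → Pre_count_empty_benches benches total_rows total_columns → Spec_count_empty_benches benches total_rows total_columns (count_empty_benches benches total_rows total_columns)

-- ===== LEMMAS AND PROOFS =====

-- the grid positions A visits, as bench keys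
def pvGrid (total_rows : Int) (total_columns : Int) : List (List Int) :=
  (PySem.List.pyRange 0 total_rows 1).flatMap (fun i =>
    (PySem.List.pyRange 0 total_columns 1).map (fun j => ([i + 1, j + 1] : List Int)))

theorem pv_mem_pvGrid (total_rows total_columns : Int) (x : List Int) :
    x ∈ pvGrid total_rows total_columns ↔ pvInGrid total_rows total_columns x = true := by
  unfold pvGrid
  simp only [List.mem_flatMap, List.mem_map, PySem.List.mem_pyRange_one]
  constructor
  · rintro ⟨i, hi, j, hj, rfl⟩
    simp [pvInGrid]; omega
  · intro h
    match x with
    | [r, c] =>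
      simp [pvInGrid] at h
      refine ⟨r - 1, by omega, c - 1, by omega, ?_⟩
      simp

theorem pv_nodup_pvGrid (total_rows total_columns : Int) :
    (pvGrid total_rows total_columns).Nodup := by
  unfold pvGrid
  rw [List.nodup_flatMap]
  constructor
  · intro i _
    exact (PySem.List.nodup_pyRange_one 0 total_columns).map
      (fun a b h => by simpa using h)
  · refine List.Pairwise.imp ?_ (PySem.List.pairwise_lt_pyRange_one 0 total_rows)
    intro a b hlt x hx hx'
    simp only [List.mem_map] at hx hx'
    obtain ⟨j, _, rfl⟩ := hx
    obtain ⟨j', _, h⟩ := hx'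
    simp at h
    omega

theorem pv_length_pvGrid (total_rows total_columns : Int) :
    ((pvGrid total_rows total_columns).length : Int) = max total_rows 0 * max total_columns 0 := by
  unfold pvGrid
  rw [List.length_flatMap]
  simp only [List.length_map, PySem.List.length_pyRange_one, sub_zero]
  rw [List.map_const', List.sum_replicate, smul_eq_mul, PySem.List.length_pyRange_one, sub_zero]
  push_cast [Int.ofNat_toNat]
  ring

theorem pv_inner (benches : List (List Int × List (String × Int))) (total_columns i a : Int) :
    (PySem.List.pyRange 0 total_columns 1).foldl (fun empty_benches j =>
        if (benches.map Prod.fst).contains ([i + 1, j + 1] : List Int) then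
          match List.lookup ([i + 1, j + 1] : List Int) benches with
          | some v =>
            match List.lookup "count" v with
            | some count => if count = 1 ∨ count = 2 then empty_benches else empty_benches
            | none => empty_benches
          | none => empty_benches
        else empty_benches + 1) a
      = a + ((((PySem.List.pyRange 0 total_columns 1).map (fun j => ([i + 1, j + 1] : List Int))).filter
              (fun k => !(benches.map Prod.fst).contains k)).length : Int) := by
  trans ((PySem.List.pyRange 0 total_columns 1).foldl
      (fun acc j => if !(benches.map Prod.fst).contains ([i + 1, j + 1] : List Int) then acc + 1 else acc) a)
  · apply PySem.List.foldl_congr_mem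
    intro acc j _
    by_cases h : (benches.map Prod.fst).contains ([i + 1, j + 1] : List Int)
    · simp only [h, Bool.not_true, if_true, Bool.false_eq_true, if_false]
      repeat first | rfl | split
    · simp only [Bool.not_eq_true] at h
      rw [h]
      simp
  · rw [PySem.List.foldl_if_add_one]
    congr 1
    simp only [List.countP_eq_length_filter, List.filter_map, List.length_map]
    rfl

theorem pv_A_eq_grid_count (benches : List (List Int × List (String × Int))) (total_rows total_columns : Int) :
    count_empty_benches benches total_rows total_columns
      = (((pvGrid total_rows total_columns).filter
          (fun k => !(benches.map Prod.fst).contains k)).length : Int) := by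
  unfold count_empty_benches
  trans ((PySem.List.pyRange 0 total_rows 1).foldl (fun a i =>
      a + ((((PySem.List.pyRange 0 total_columns 1).map (fun j => ([i + 1, j + 1] : List Int))).filter
            (fun k => !(benches.map Prod.fst).contains k)).length : Int)) 0)
  · apply PySem.List.foldl_congr_mem
    intro acc i _
    exact pv_inner benches total_columns i acc
  · rw [PySem.List.foldl_add, zero_add]
    unfold pvGrid
    rw [List.filter_flatMap, List.length_flatMap, Nat.cast_list_sum, List.map_map]
    rfl

theorem pv_occupied_count (benches : List (List Int × List (String × Int))) (total_rows total_columns : Int) :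
    ((pvGrid total_rows total_columns).filter
        (fun k => (benches.map Prod.fst).contains k)).length
      = (PySem.Set.ofList ((benches.map Prod.fst).filter (pvInGrid total_rows total_columns))).length := by
  apply List.Perm.length_eq
  rw [List.perm_ext_iff_of_nodup
    (List.Nodup.filter _ (pv_nodup_pvGrid total_rows total_columns))
    (PySem.Set.nodup_ofList _)]
  intro x
  simp only [List.mem_filter, PySem.Set.mem_ofList, pv_mem_pvGrid, List.contains_iff_mem]
  tauto

-- ===== VERDICT (by name: the statement is the Claim_ definition above) =====
theorem count_empty_benches_spec : Claim_equal_count_empty_benches := by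
  intro benches total_rows total_columns _ _
  unfold Spec_count_empty_benches
  have halt : count_empty_benches_alt benches total_rows total_columns
      = max total_rows 0 * max total_columns 0
        - ((PySem.Set.ofList ((benches.map Prod.fst).filter (pvInGrid total_rows total_columns))).length : Int) := rfl
  rw [pv_A_eq_grid_count, halt]
  have hsplit := List.length_eq_length_filter_add
    (l := pvGrid total_rows total_columns) (f := fun k => (benches.map Prod.fst).contains k)
  have hle : ((pvGrid total_rows total_columns).filter
      (fun k => (benches.map Prod.fst).contains k)).length
      ≤ (pvGrid total_rows total_columns).length := List.length_filter_le _ _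
  have hlen := pv_length_pvGrid total_rows total_columns
  have hocc := pv_occupied_count benches total_rows total_columns
  omega
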